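-- pv_equiv track=rewrite | github.com/maxime-rousselet-cnes/alna | alna/constants.py | renard_number_system
-- ===== SOURCE A (Python) =====
-- def renard_number_system(n_max: int):
--     """
--     Produces the list [1, 2, 5, 10, 20, ... until n_max.
--     """
--
--     result = []
--     base = 1
--
--     while base <= n_max:
--
--         for factor in (1, 2, 5):
--
--             value = base * factor
--
--             if value > n_max:
--
--                 return result
--
--             result += [value]
--
--         base *= 10
--
--     return result
-- ===== SOURCE B (Python) =====
-- def renard_number_system(n_max: int):
--     """
--     Produces the list [1, 2, 5, 10, 20, ... until n_max.
--     """
--     result = []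
--     i = 0
--     while True:
--         value = (1, 2, 5)[i % 3] * 10 ** (i // 3)
--         if value > n_max:
--             return result
--         result.append(value)
--         i += 1
-- ===== Notes on version B (the rewrite author's own statement) =====
-- stated objective: simpler
-- what changed: Replaced A's nested while(base)/for(factor) loops and mid-loop early return with a single counter loop computing value = (1,2,5)[i%3] * 10**(i//3) and one stop test value > n_max.
import Mathlib
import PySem

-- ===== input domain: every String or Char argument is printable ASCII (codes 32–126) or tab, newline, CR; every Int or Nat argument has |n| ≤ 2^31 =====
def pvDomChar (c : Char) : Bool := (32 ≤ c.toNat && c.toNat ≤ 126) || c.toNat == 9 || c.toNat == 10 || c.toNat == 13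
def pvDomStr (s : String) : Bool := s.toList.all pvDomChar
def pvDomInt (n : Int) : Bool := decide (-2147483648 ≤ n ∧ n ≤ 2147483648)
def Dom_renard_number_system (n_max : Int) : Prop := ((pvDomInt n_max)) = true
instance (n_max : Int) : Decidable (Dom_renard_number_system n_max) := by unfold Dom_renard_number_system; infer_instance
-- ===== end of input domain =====

-- B replaces A's nested while/for loops by a single counter loop computing (1,2,5)[i%3]*10^(i//3); objective: simpler (one loop, one stop test).

-- ===== PORT A =====
-- A's while-loop with its for-body unrolled over (1,2,5); 'base' is always
-- 10^k in the Python run, carried here as the exponent k so that the loop's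
-- termination (10^k eventually exceeds n_max) is visible to Lean.
def renardGoA (n_max : Int) (k : Nat) (result : List Int) : List Int :=
  let base : Int := 10 ^ k
  if base ≤ n_max then
    if base * 1 > n_max then result
    else
      let r1 := result ++ [base * 1]
      if base * 2 > n_max then r1
      else
        let r2 := r1 ++ [base * 2]
        if base * 5 > n_max then r2
        else renardGoA n_max (k + 1) (r2 ++ [base * 5])
  else result
termination_by (n_max - 10 ^ k).toNat
decreasing_by
  have h1 : (1 : Int) ≤ 10 ^ k := one_le_pow₀ (by norm_num)
  have h2 : (10 : Int) ^ (k + 1) = 10 ^ k * 10 := pow_succ 10 k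
  omega

def renard_number_system (n_max : Int) : List Int :=
  renardGoA n_max 0 []

-- ===== PORT B =====
def renardFct (i : Nat) : Int := if i % 3 = 0 then 1 else if i % 3 = 1 then 2 else 5

-- the loop value at counter i is at least i+1, so B's loop stops;
-- cited by renardGoB's decreasing_by, hence stated before the port.
theorem renardFct_ge (i : Nat) : (i : Int) + 1 ≤ renardFct i * 10 ^ (i / 3) := by
  have hpow : ∀ k : Nat, (3 * (k : Int) + 1) ≤ 10 ^ k := by
    intro k
    induction k with
    | zero => norm_num
    | succ m ih =>
      rw [pow_succ]
      push_cast
      nlinarith [ih, Int.natCast_nonneg m]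
  have hp := hpow (i / 3)
  have h3 : i % 3 = 0 ∨ i % 3 = 1 ∨ i % 3 = 2 := by omega
  rcases h3 with h3 | h3 | h3 <;> simp [renardFct, h3] <;> omega

def renardGoB (n_max : Int) (i : Nat) (acc : List Int) : List Int :=
  let value : Int := renardFct i * 10 ^ (i / 3)
  if value > n_max then acc
  else renardGoB n_max (i + 1) (acc ++ [value])
termination_by (n_max + 1 - i).toNat
decreasing_by
  have := renardFct_ge i
  omega

def renard_number_system_alt (n_max : Int) : List Int :=
  renardGoB n_max 0 []

-- ===== PRECONDITION & SPEC =====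
def Spec_renard_number_system (n_max : Int) (out : List Int) : Prop := out = renard_number_system_alt n_max
instance (n_max : Int) (out : List Int) : Decidable (Spec_renard_number_system n_max out) := by unfold Spec_renard_number_system; infer_instance

-- ===== CLAIM (what is proved, stated in full; the proofs are below) =====
def Claim_equal_renard_number_system : Prop := ∀ (n_max : Int), Dom_renard_number_system n_max → Spec_renard_number_system n_max (renard_number_system n_max)

-- ===== LEMMAS AND PROOFS =====

theorem renardGoB_step (n_max : Int) (i : Nat) (acc : List Int) :
    renardGoB n_max i acc =
      if renardFct i * 10 ^ (i / 3) > n_max then acc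
      else renardGoB n_max (i + 1) (acc ++ [renardFct i * 10 ^ (i / 3)]) := by
  rw [renardGoB]

theorem renardFprod0 (k : Nat) : renardFct (3 * k) * 10 ^ ((3 * k) / 3) = 10 ^ k := by
  have h1 : (3 * k) % 3 = 0 := by omega
  have h2 : (3 * k) / 3 = k := by omega
  simp [renardFct, h1, h2]

theorem renardFprod1 (k : Nat) : renardFct (3 * k + 1) * 10 ^ ((3 * k + 1) / 3) = 2 * 10 ^ k := by
  have h1 : (3 * k + 1) % 3 = 1 := by omega
  have h2 : (3 * k + 1) / 3 = k := by omega
  simp [renardFct, h1, h2]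

theorem renardFprod2 (k : Nat) : renardFct (3 * k + 1 + 1) * 10 ^ ((3 * k + 1 + 1) / 3) = 5 * 10 ^ k := by
  have h1 : (3 * k + 1 + 1) % 3 = 2 := by omega
  have h2 : (3 * k + 1 + 1) / 3 = k := by omega
  simp [renardFct, h1, h2]

theorem renardGoA_eq_goB (n_max : Int) (k : Nat) (acc : List Int) :
    renardGoA n_max k acc = renardGoB n_max (3 * k) acc := by
  fun_induction renardGoA n_max k acc with
  | case1 k acc base hle h1 =>
    have hle' : (10 : Int) ^ k ≤ n_max := hle
    have h1' : (10 : Int) ^ k * 1 > n_max := h1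
    omega
  | case2 k acc base hle h1 r1 h2 =>
    have hle' : (10 : Int) ^ k ≤ n_max := hle
    have h2' : (10 : Int) ^ k * 2 > n_max := h2
    rw [renardGoB_step, renardFprod0, if_neg (by omega)]
    rw [renardGoB_step, renardFprod1, if_pos (by omega)]
    show acc ++ [(10 : Int) ^ k * 1] = acc ++ [(10 : Int) ^ k]
    rw [mul_one]
  | case3 k acc base hle h1 r1 h2 r2 h5 =>
    have hle' : (10 : Int) ^ k ≤ n_max := hle
    have h2' : ¬ (10 : Int) ^ k * 2 > n_max := h2
    have h5' : (10 : Int) ^ k * 5 > n_max := h5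
    rw [renardGoB_step, renardFprod0, if_neg (by omega)]
    rw [renardGoB_step, renardFprod1, if_neg (by omega)]
    rw [renardGoB_step, renardFprod2, if_pos (by omega)]
    show (acc ++ [(10 : Int) ^ k * 1]) ++ [(10 : Int) ^ k * 2]
        = (acc ++ [(10 : Int) ^ k]) ++ [2 * 10 ^ k]
    rw [mul_one, mul_comm]
  | case4 k acc base hle h1 r1 h2 r2 h5 ih =>
    have hle' : (10 : Int) ^ k ≤ n_max := hle
    have h2' : ¬ (10 : Int) ^ k * 2 > n_max := h2
    have h5' : ¬ (10 : Int) ^ k * 5 > n_max := h5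
    rw [renardGoB_step, renardFprod0, if_neg (by omega)]
    rw [renardGoB_step, renardFprod1, if_neg (by omega)]
    rw [renardGoB_step, renardFprod2, if_neg (by omega)]
    have e3 : 3 * k + 1 + 1 + 1 = 3 * (k + 1) := by omega
    rw [e3]
    have eacc : (acc ++ [(10 : Int) ^ k]) ++ [2 * 10 ^ k] ++ [5 * 10 ^ k]
        = ((acc ++ [(10 : Int) ^ k * 1]) ++ [(10 : Int) ^ k * 2]) ++ [(10 : Int) ^ k * 5] := by
      rw [mul_one, mul_comm ((10 : Int) ^ k) 2, mul_comm ((10 : Int) ^ k) 5]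
    rw [eacc]
    exact ih
  | case5 k acc base hgt =>
    have hgt' : ¬ (10 : Int) ^ k ≤ n_max := hgt
    rw [renardGoB_step, renardFprod0, if_pos (by omega)]

-- ===== VERDICT (by name: the statement is the Claim_ definition above) =====
theorem renard_number_system_spec : Claim_equal_renard_number_system := by
  intro n_max _
  show renard_number_system n_max = renard_number_system_alt n_max
  unfold renard_number_system renard_number_system_alt
  simpa using renardGoA_eq_goB n_max 0 []
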